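-- pv_equiv track=rewrite | github.com/Tony-Wang313/programming | Assign1.py | count_multiples_of_3
-- ===== SOURCE A (Python) =====
-- def count_multiples_of_3(limit):
--     if limit <1 :
--         return "Invalid limit"
--     num = 1
--     result = ""
--     while num <= limit:
--         if num % 3 == 0:
--             result += "Multiple of 3\n"
--         else:
--             result += str(num) + "\n"
--         num += 1
--     return result.strip()
-- ===== SOURCE B (Python) =====
-- def count_multiples_of_3(limit):
--     if limit < 1:
--         return "Invalid limit"
--     lst = [str(n) for n in range(1, limit + 1)]
--     lst[2::3] = ["Multiple of 3"] * len(lst[2::3])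
--     return "\n".join(lst)
-- ===== Notes on version B (the rewrite author's own statement) =====
-- stated objective: alternative
-- what changed: Replaces A's single while-loop with a per-element branch and string concatenation followed by strip() by a build-then-patch decomposition: build all number lines in one comprehension, overwrite every third position with one stride slice assignment, and join with newline (no trailing newline to strip).
import Mathlib
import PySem

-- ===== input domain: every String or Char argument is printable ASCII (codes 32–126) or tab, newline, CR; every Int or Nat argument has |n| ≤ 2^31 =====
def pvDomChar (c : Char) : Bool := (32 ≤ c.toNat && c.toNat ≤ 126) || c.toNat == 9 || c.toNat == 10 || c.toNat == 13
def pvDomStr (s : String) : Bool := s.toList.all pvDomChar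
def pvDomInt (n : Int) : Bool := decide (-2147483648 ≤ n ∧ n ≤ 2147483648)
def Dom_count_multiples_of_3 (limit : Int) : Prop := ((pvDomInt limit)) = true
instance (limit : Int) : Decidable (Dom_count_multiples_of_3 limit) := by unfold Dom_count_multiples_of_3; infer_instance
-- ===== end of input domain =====

-- B rebuilds the answer as build-then-patch (comprehension, stride-slice overwrite, join) instead of A's
-- single branching while-loop with string concatenation and a final strip(); return values are identical.

-- ===== PORT A =====
-- while num <= limit: append one line (with '\n') per number; the string is kept as List Char
-- (PySem convention); fuel counts the remaining iterations (a totality guard only, never exhausted early)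
def countLoopA (limit : Int) : Nat → Int → List Char → List Char
  | 0, _, result => result
  | fuel + 1, num, result =>
    if num ≤ limit then
      countLoopA limit fuel (num + 1)
        (result ++ (if PySem.Int.mod num 3 = 0 then "Multiple of 3\n".toList
                    else PySem.Int.toChars num ++ ['\n']))
    else result

def count_multiples_of_3 (limit : Int) : String :=
  if limit < 1 then "Invalid limit"
  else String.ofList (PySem.Chars.strip (countLoopA limit limit.toNat 1 []))

-- ===== PORT B =====
def count_multiples_of_3_alt (limit : Int) : String :=
  if limit < 1 then "Invalid limit"
  else
    -- "\n".join(lst) where lst = [str(n) for n in range(1, limit+1)] and then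
    -- lst[2::3] = ["Multiple of 3"] * len(lst[2::3]) : this stride-3 slice assignment starting at
    -- index 2 overwrites exactly the positions i with i % 3 == 2 (exact for this stride and extent)
    String.ofList (PySem.Chars.join ['\n']
      (((PySem.List.pyRange 1 (limit + 1) 1).map PySem.Int.toChars).mapIdx
        (fun i s => if i % 3 = 2 then "Multiple of 3".toList else s)))

-- ===== PRECONDITION & SPEC =====
def Spec_count_multiples_of_3 (limit : Int) (out : String) : Prop := out = count_multiples_of_3_alt limit
instance (limit : Int) (out : String) : Decidable (Spec_count_multiples_of_3 limit out) := by unfold Spec_count_multiples_of_3; infer_instance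

-- ===== CLAIM (what is proved, stated in full; the proofs are below) =====
def Claim_equal_count_multiples_of_3 : Prop := ∀ (limit : Int), Dom_count_multiples_of_3 limit → Spec_count_multiples_of_3 limit (count_multiples_of_3 limit)

-- ===== LEMMAS AND PROOFS =====

-- the line printed for the number m
def lineFor (m : Int) : List Char :=
  if PySem.Int.mod m 3 = 0 then "Multiple of 3".toList else PySem.Int.toChars m

def linesFor (limit : Int) : List (List Char) :=
  (PySem.List.pyRange 1 (limit + 1) 1).map lineFor

-- a line is nonempty and starts/ends with a non-whitespace character
def goodLine (l : List Char) : Prop :=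
  l ≠ [] ∧ PySem.Chars.isspace (l.head?.getD ' ') = false
        ∧ PySem.Chars.isspace (l.getLast?.getD ' ') = false

theorem mult3_toList : "Multiple of 3\n".toList = "Multiple of 3".toList ++ ['\n'] := by rfl

theorem digitChar_not_space (k : Nat) : PySem.Chars.isspace (Nat.digitChar k) = false := by
  rcases k with _|_|_|_|_|_|_|_|_|_|_|_|_|_|_|_|k
  all_goals try decide
  have h : Nat.digitChar (k + 16) = '*' := by
    unfold Nat.digitChar
    rw [if_neg (by omega), if_neg (by omega), if_neg (by omega), if_neg (by omega),
        if_neg (by omega), if_neg (by omega), if_neg (by omega), if_neg (by omega),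
        if_neg (by omega), if_neg (by omega), if_neg (by omega), if_neg (by omega),
        if_neg (by omega), if_neg (by omega), if_neg (by omega), if_neg (by omega)]
  rw [show k + 1 + 1 + 1 + 1 + 1 + 1 + 1 + 1 + 1 + 1 + 1 + 1 + 1 + 1 + 1 + 1 = k + 16 from by omega, h]
  decide

theorem toDigitsCore_not_space (fuel : Nat) : ∀ (n : Nat) (ds : List Char),
    (∀ c ∈ ds, PySem.Chars.isspace c = false) →
    ∀ c ∈ Nat.toDigitsCore 10 fuel n ds, PySem.Chars.isspace c = false := by
  induction fuel with
  | zero => intro n ds hds c hc; simp only [Nat.toDigitsCore] at hc; exact hds c hc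
  | succ f ih =>
    intro n ds hds c hc
    simp only [Nat.toDigitsCore] at hc
    split at hc
    · rcases List.mem_cons.mp hc with h | h
      · subst h; exact digitChar_not_space _
      · exact hds c h
    · refine ih _ _ ?_ c hc
      intro c' hc'
      rcases List.mem_cons.mp hc' with h | h
      · subst h; exact digitChar_not_space _
      · exact hds c' h

theorem toDigitsCore_ne_nil (fuel : Nat) : ∀ (n : Nat) (ds : List Char),
    0 < fuel ∨ ds ≠ [] → Nat.toDigitsCore 10 fuel n ds ≠ [] := by
  induction fuel with
  | zero =>
    intro n ds h
    simp only [Nat.toDigitsCore]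
    rcases h with h | h
    · exact absurd h (lt_irrefl 0)
    · exact h
  | succ f ih =>
    intro n ds _
    simp only [Nat.toDigitsCore]
    split
    · simp
    · exact ih _ _ (Or.inr (by simp))

theorem goodLine_toChars (m : Int) (h : 0 ≤ m) : goodLine (PySem.Int.toChars m) := by
  have hdef : PySem.Int.toChars m = Nat.toDigits 10 m.toNat := by
    simp [PySem.Int.toChars, not_lt.mpr h]
  rw [hdef]
  unfold Nat.toDigits
  have hne : Nat.toDigitsCore 10 (m.toNat + 1) m.toNat [] ≠ [] :=
    toDigitsCore_ne_nil _ _ _ (Or.inl (Nat.succ_pos _))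
  have hns : ∀ c ∈ Nat.toDigitsCore 10 (m.toNat + 1) m.toNat [], PySem.Chars.isspace c = false :=
    toDigitsCore_not_space _ _ _ (by intro c hc; simp at hc)
  refine ⟨hne, ?_, ?_⟩
  · rcases hh : (Nat.toDigitsCore 10 (m.toNat + 1) m.toNat []).head? with _ | c
    · rw [List.head?_eq_none_iff] at hh; exact absurd hh hne
    · simpa using hns c (List.mem_of_mem_head? (by rw [hh]; exact Option.mem_some_self c))
  · rcases hh : (Nat.toDigitsCore 10 (m.toNat + 1) m.toNat []).getLast? with _ | c
    · rw [List.getLast?_eq_none_iff] at hh; exact absurd hh hne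
    · simpa using hns c (List.mem_of_getLast? hh)

theorem goodLine_lineFor (m : Int) (h : 0 ≤ m) : goodLine (lineFor m) := by
  unfold lineFor
  split
  · exact ⟨by decide, by decide, by decide⟩
  · exact goodLine_toChars m h

-- one-step equation for join
theorem join_cons_eq (l : List Char) (ls : List (List Char)) :
    PySem.Chars.join ['\n'] (l :: ls) =
      l ++ (if ls = [] then [] else '\n' :: PySem.Chars.join ['\n'] ls) := by
  cases ls with
  | nil => rw [PySem.Chars.join_singleton, if_pos rfl, List.append_nil]
  | cons b rest =>
    rw [PySem.Chars.join_cons_cons, if_neg (by simp), List.append_assoc]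
    rfl

theorem join_good (ls : List (List Char)) : ∀ (l : List Char),
    (∀ x ∈ l :: ls, goodLine x) → goodLine (PySem.Chars.join ['\n'] (l :: ls)) := by
  induction ls with
  | nil =>
    intro l h
    rw [join_cons_eq]; simpa using h l (by simp)
  | cons b rest ih =>
    intro l h
    have hl : goodLine l := h l (by simp)
    have hrest : goodLine (PySem.Chars.join ['\n'] (b :: rest)) := by
      refine ih b ?_
      intro x hx; exact h x (by simp at hx ⊢; tauto)
    rw [join_cons_eq, if_neg (by simp)]
    obtain ⟨hne, hh, -⟩ := hl
    obtain ⟨hne', -, hg'⟩ := hrest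
    refine ⟨by simp [hne], ?_, ?_⟩
    · rcases l with _ | ⟨c, cs⟩
      · exact absurd rfl hne
      · simpa using hh
    · rw [List.getLast?_append_of_ne_nil _ (by simp : ('\n' :: PySem.Chars.join ['\n'] (b :: rest)) ≠ [])]
      rw [show ('\n' :: PySem.Chars.join ['\n'] (b :: rest)) = ['\n'] ++ PySem.Chars.join ['\n'] (b :: rest) from rfl,
          List.getLast?_append_of_ne_nil _ hne']
      exact hg'

theorem strip_append_newline (cs : List Char) (h : goodLine cs) :
    PySem.Chars.strip (cs ++ ['\n']) = cs := by
  obtain ⟨hne, hh, hg⟩ := h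
  unfold PySem.Chars.strip PySem.Chars.lstrip PySem.Chars.rstrip
  rcases cs with _ | ⟨c, rest⟩
  · exact absurd rfl hne
  have hc : PySem.Chars.isspace c = false := by simpa using hh
  rw [List.cons_append, List.dropWhile_cons_of_neg (by simp [hc])]
  rw [show (c :: (rest ++ ['\n'])).reverse = '\n' :: (rest.reverse ++ [c]) from by simp]
  rw [List.dropWhile_cons_of_pos (by decide)]
  rcases hrr : rest.reverse ++ [c] with _ | ⟨d, ds⟩
  · simp at hrr
  · have hlast : (c :: rest).getLast? = some d := by
      rw [← List.head?_reverse, show (c :: rest).reverse = rest.reverse ++ [c] from by simp, hrr]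
      rfl
    have hd : PySem.Chars.isspace d = false := by rw [hlast] at hg; simpa using hg
    rw [List.dropWhile_cons_of_neg (by simp [hd])]
    rw [← hrr, show rest.reverse ++ [c] = (c :: rest).reverse from by simp, List.reverse_reverse]

theorem flatten_lines (ls : List (List Char)) (hne : ls ≠ []) :
    (ls.map (· ++ ['\n'])).flatten = PySem.Chars.join ['\n'] ls ++ ['\n'] := by
  induction ls with
  | nil => exact absurd rfl hne
  | cons l rest ih =>
    rcases rest with _ | ⟨b, rs⟩
    · rw [join_cons_eq, if_pos rfl, List.append_nil]; simp
    · rw [List.map_cons, List.flatten_cons, ih (by simp), join_cons_eq l (b :: rs), if_neg (by simp)]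
      simp [List.append_assoc]

theorem countLoopA_eq (limit : Int) (fuel : Nat) : ∀ (num : Int) (acc : List Char),
    (limit + 1 - num).toNat ≤ fuel →
    countLoopA limit fuel num acc =
      acc ++ ((PySem.List.pyRange num (limit + 1) 1).map (fun m => lineFor m ++ ['\n'])).flatten := by
  induction fuel with
  | zero =>
    intro num acc h
    rw [PySem.List.pyRange_one_eq_nil (by omega)]
    simp [countLoopA]
  | succ f ih =>
    intro num acc h
    simp only [countLoopA]
    by_cases hle : num ≤ limit
    · rw [if_pos hle, ih (num + 1) _ (by omega),
          PySem.List.pyRange_one_cons (by omega : num < limit + 1), List.map_cons, List.flatten_cons]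
      have hline : (if PySem.Int.mod num 3 = 0 then "Multiple of 3\n".toList
                    else PySem.Int.toChars num ++ ['\n']) = lineFor num ++ ['\n'] := by
        unfold lineFor; split
        · rw [mult3_toList]
        · rfl
      rw [hline, List.append_assoc]
    · rw [if_neg hle, PySem.List.pyRange_one_eq_nil (by omega)]
      simp

theorem alt_patched_eq (limit : Int) :
    ((PySem.List.pyRange 1 (limit + 1) 1).map PySem.Int.toChars).mapIdx
      (fun i s => if i % 3 = 2 then "Multiple of 3".toList else s) = linesFor limit := by
  unfold linesFor
  rw [PySem.List.pyRange_one]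
  apply List.ext_getElem
  · simp
  · intro i h1 h2
    simp only [List.getElem_mapIdx, List.getElem_map, List.getElem_range]
    unfold lineFor
    have hmod : PySem.Int.mod (1 + (i : Int)) 3 = (((1 + i) % 3 : Nat) : Int) := by
      have h' : (1 : Int) + (i : Int) = ((1 + i : Nat) : Int) := by push_cast; ring
      rw [h']; exact_mod_cast PySem.Int.mod_natCast (1 + i) 3
    rw [hmod]
    by_cases hc : i % 3 = 2
    · rw [if_pos hc, if_pos (by exact_mod_cast (show ((1 + i) % 3 : Nat) = 0 by omega))]
    · rw [if_neg hc, if_neg (fun hz => hc (by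
        have hz' : (1 + i) % 3 = 0 := by exact_mod_cast hz
        omega))]

theorem linesFor_ne_nil (limit : Int) (h : 1 ≤ limit) : linesFor limit ≠ [] := by
  unfold linesFor
  rw [PySem.List.pyRange_one_cons (by omega : (1 : Int) < limit + 1)]
  simp

theorem linesFor_good (limit : Int) : ∀ l ∈ linesFor limit, goodLine l := by
  intro l hl
  unfold linesFor at hl
  rcases List.mem_map.mp hl with ⟨m, hm, rfl⟩
  have := (PySem.List.mem_pyRange_one).mp hm
  exact goodLine_lineFor m (by omega)

-- ===== VERDICT (by name: the statement is the Claim_ definition above) =====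
theorem count_multiples_of_3_spec : Claim_equal_count_multiples_of_3 := by
  intro limit _
  unfold Spec_count_multiples_of_3 count_multiples_of_3 count_multiples_of_3_alt
  by_cases hlt : limit < 1
  · rw [if_pos hlt, if_pos hlt]
  · rw [if_neg hlt, if_neg hlt, alt_patched_eq]
    have h1 : (1 : Int) ≤ limit := by omega
    rw [countLoopA_eq limit limit.toNat 1 [] (by omega), List.nil_append]
    have hmap : (PySem.List.pyRange 1 (limit + 1) 1).map (fun m => lineFor m ++ ['\n'])
        = (linesFor limit).map (· ++ ['\n']) := by
      unfold linesFor; rw [List.map_map]; rfl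
    rw [hmap, flatten_lines _ (linesFor_ne_nil limit h1)]
    rcases hls : linesFor limit with _ | ⟨l, ls⟩
    · exact absurd hls (linesFor_ne_nil limit h1)
    · rw [strip_append_newline _ (join_good ls l (fun x hx => linesFor_good limit x (by rw [hls]; exact hx)))]
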